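-- pv_equiv track=rewrite | github.com/meangolden/old-files | modulation/encoding.py | fm0
-- ===== SOURCE A (Python) =====
-- def fm0(binary_data):
--
--     if binary_data[0] == 0:
--         m = [0,0]
--     else:
--         m = [1,0]
--
--
--     for b in binary_data[1:len(binary_data)]:
--         if b == 0:
--             m.append((m[-1]+1) % 2)
--             m.append(m[-1])
--
--         else:
--             m.append(m[-1])
--             m.append((m[-1]+1) % 2)
--     m.append(m[-1])
--     return m
-- ===== SOURCE B (Python) =====
-- def fm0(binary_data):
--     # Phase 1: per-bit transition flags (toggle-then-hold for 0, hold-then-toggle for 1),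
--     # plus a trailing hold flag.
--     flags = []
--     for b in binary_data:
--         flags.extend([1, 0] if b == 0 else [0, 1])
--     flags.append(0)
--     # Phase 2: integrate the flags from an idle level of 1.
--     level = 1
--     out = []
--     for f in flags:
--         if f:
--             level = 1 - level
--         out.append(level)
--     return out
-- ===== Notes on version B (the rewrite author's own statement) =====
-- stated objective: alternative
-- what changed: Replaces A's single stateful pass that appends two level samples per bit (peeking at m[-1] twice) by a two-phase pipeline: first map each bit to a pair of transition flags plus a trailing hold flag, then integrate the flag stream from idle level 1 with a toggle scan.
import Mathlib
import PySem

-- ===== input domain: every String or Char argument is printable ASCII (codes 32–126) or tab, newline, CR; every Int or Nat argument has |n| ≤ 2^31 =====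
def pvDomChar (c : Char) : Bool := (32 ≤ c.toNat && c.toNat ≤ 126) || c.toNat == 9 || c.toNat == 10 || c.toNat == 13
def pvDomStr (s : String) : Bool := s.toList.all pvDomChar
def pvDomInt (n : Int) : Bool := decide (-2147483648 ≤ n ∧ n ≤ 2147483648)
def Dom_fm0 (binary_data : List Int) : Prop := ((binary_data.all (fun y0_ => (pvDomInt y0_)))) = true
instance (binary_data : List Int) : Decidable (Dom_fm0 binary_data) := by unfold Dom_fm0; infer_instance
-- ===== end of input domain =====

-- B replaces A's single stateful append-two-samples-per-bit pass by a two-phase pipeline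
-- (map bits to transition flags, then integrate the flag stream); alternative decomposition,
-- same cost. A raises IndexError on the empty list (excluded by Pre_).


-- ===== PORT A =====
-- m[-1] with default (m is nonempty at every use site)
def fm0Last (m : List Int) : Int := PySem.List.pyGetD m (-1) 0

-- one iteration of A's for-loop body
def fm0Step (m : List Int) (b : Int) : List Int :=
  if b == 0 then
    let m1 := m ++ [PySem.Int.mod (fm0Last m + 1) 2]
    m1 ++ [fm0Last m1]
  else
    let m1 := m ++ [fm0Last m]
    m1 ++ [PySem.Int.mod (fm0Last m1 + 1) 2]

def fm0 (binary_data : List Int) : List Int :=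
  match PySem.List.pyGet? binary_data 0 with
  | none => []   -- IndexError in Python: excluded by Pre_fm0
  | some b0 =>
    let m0 : List Int := if b0 == 0 then [0, 0] else [1, 0]
    let m := (PySem.List.slice binary_data (some 1) (some (PySem.List.len binary_data))).foldl fm0Step m0
    m ++ [fm0Last m]

-- ===== PORT B =====
-- transition flags for one bit
def fm0Flags (b : Int) : List Int := if b == 0 then [1, 0] else [0, 1]

-- one step of the integrating scan: state = (level, out)
def fm0Scan (st : Int × List Int) (f : Int) : Int × List Int :=
  let level := if f ≠ 0 then 1 - st.1 else st.1
  (level, st.2 ++ [level])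

def fm0_alt (binary_data : List Int) : List Int :=
  let flags := binary_data.foldl (fun acc b => acc ++ fm0Flags b) ([] : List Int) ++ [0]
  (flags.foldl fm0Scan ((1 : Int), ([] : List Int))).2

-- ===== PRECONDITION & SPEC =====
-- A raises IndexError on the empty list (binary_data[0]); Pre_ excludes exactly that input.
def Pre_fm0 (binary_data : List Int) : Prop := binary_data ≠ []
instance (binary_data : List Int) : Decidable (Pre_fm0 binary_data) := by unfold Pre_fm0; infer_instance

def pvWitness_fm0 : List Int := [1, 0, 1]

def Spec_fm0 (binary_data : List Int) (out : List Int) : Prop := out = fm0_alt binary_data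
instance (binary_data : List Int) (out : List Int) : Decidable (Spec_fm0 binary_data out) := by unfold Spec_fm0; infer_instance

-- ===== CLAIM (what is proved, stated in full; the proofs are below) =====
def Claim_equal_fm0 : Prop := ∀ (binary_data : List Int), Dom_fm0 binary_data → Pre_fm0 binary_data → Spec_fm0 binary_data (fm0 binary_data)

-- ===== LEMMAS AND PROOFS =====

theorem fm0Last_append (m : List Int) (x : Int) : fm0Last (m ++ [x]) = x := by
  simp [fm0Last, PySem.List.pyGetD_neg_one_append_singleton]

-- A's loop body appends exactly the pair that B's flag pair integrates to.
theorem fm0Step_eq (m : List Int) (b L : Int) (h : fm0Last m = L) (hL : L = 0 ∨ L = 1) :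
    fm0Step m b = m ++ (if b == 0 then [1 - L, 1 - L] else [L, 1 - L]) := by
  rcases hL with hL | hL <;> subst hL <;>
    simp [fm0Step, h, fm0Last_append] <;> split <;> simp

theorem fm0Scan_flags (b L : Int) (out : List Int) :
    List.foldl fm0Scan (L, out) (fm0Flags b) =
      (1 - L, out ++ (if b == 0 then [1 - L, 1 - L] else [L, 1 - L])) := by
  by_cases hb : b == 0 <;> simp [fm0Flags, fm0Scan, hb]

-- loop invariant: A's running list equals B's running output, and its last element is B's level
theorem fm0_loop (rest : List Int) : ∀ (m : List Int) (L : Int),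
    fm0Last m = L → (L = 0 ∨ L = 1) →
    (rest.foldl fm0Step m) ++ [fm0Last (rest.foldl fm0Step m)] =
      ((rest.flatMap fm0Flags ++ [0]).foldl fm0Scan (L, m)).2 := by
  induction rest with
  | nil => intro m L h hL; simp [fm0Scan, h]
  | cons b rest ih =>
    intro m L h hL
    have hstep := fm0Step_eq m b L h hL
    have hlast : fm0Last (fm0Step m b) = 1 - L := by
      rw [hstep]; split <;>
        [exact (show m ++ [1-L,1-L] = (m ++ [1-L]) ++ [1-L] by simp) ▸ fm0Last_append _ _;
         exact (show m ++ [L,1-L] = (m ++ [L]) ++ [1-L] by simp) ▸ fm0Last_append _ _]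
    have hL' : (1 - L) = 0 ∨ (1 - L) = 1 := by omega
    rw [List.foldl_cons, ih (fm0Step m b) (1 - L) hlast hL']
    conv_rhs => rw [List.flatMap_cons, List.append_assoc, List.foldl_append, fm0Scan_flags]
    rw [← hstep]

theorem fm0_spec : Claim_equal_fm0 := by
  intro bd _ hpre
  unfold Spec_fm0
  match bd, hpre with
  | b0 :: rest, _ =>
    have hslice : PySem.List.slice (b0 :: rest) (some 1) (some (PySem.List.len (b0 :: rest))) = rest := by
      have h1 : (PySem.List.len (b0 :: rest)) = ((rest.length + 1 : Nat) : Int) := by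
        simp [PySem.List.len_eq]
      rw [h1, show (some (1:Int)) = some ((1:Nat):Int) from rfl, PySem.List.slice_natCast]
      simp
    have hflat : (b0 :: rest).foldl (fun acc b => acc ++ fm0Flags b) ([] : List Int) =
        (b0 :: rest).flatMap fm0Flags := by
      simpa using PySem.List.foldl_append_eq_flatMap fm0Flags (b0 :: rest) []
    have hm0 : fm0Last (if b0 == 0 then ([0, 0] : List Int) else [1, 0]) = 0 := by
      split <;> decide
    have hloop := fm0_loop rest (if b0 == 0 then ([0, 0] : List Int) else [1, 0]) 0 hm0 (Or.inl rfl)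
    have hfirst : List.foldl fm0Scan (1, ([] : List Int)) (fm0Flags b0) =
        (0, if b0 == 0 then ([0, 0] : List Int) else [1, 0]) := by
      rw [fm0Scan_flags]; split <;> norm_num
    show fm0 (b0 :: rest) = fm0_alt (b0 :: rest)
    rw [List.foldl_append] at hloop
    rw [fm0, fm0_alt]
    simp only [PySem.List.pyGet?_zero_cons, hslice, hflat, List.flatMap_cons, List.append_assoc,
      List.foldl_append, hfirst]
    exact hloop
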